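-- pv_equiv track=rewrite | github.com/neumbilly/backdoor-consistency | src/metrics.py | confusion_from_flags
-- ===== SOURCE A (Python) =====
-- from typing import Iterable
--
-- def confusion_from_flags(predicted_positive: Iterable[bool], actual_positive: Iterable[bool]) -> dict[str, int]:
--     tp = fp = tn = fn = 0
--     for pred, actual in zip(predicted_positive, actual_positive):
--         if pred and actual:
--             tp += 1
--         elif pred and not actual:
--             fp += 1
--         elif not pred and not actual:
--             tn += 1
--         else:
--             fn += 1
--     return {"tp": tp, "fp": fp, "tn": tn, "fn": fn}
-- ===== SOURCE B (Python) =====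
-- def confusion_from_flags(predicted_positive, actual_positive):
--     pairs = list(zip(predicted_positive, actual_positive))
--     n = len(pairs)
--     p = sum(1 for pred, _ in pairs if pred)
--     a = sum(1 for _, act in pairs if act)
--     tp = sum(1 for pred, act in pairs if pred and act)
--     fp = p - tp
--     fn = a - tp
--     tn = n - tp - fp - fn
--     return {"tp": tp, "fp": fp, "tn": tn, "fn": fn}
-- ===== Notes on version B (the rewrite author's own statement) =====
-- stated objective: alternative
-- what changed: Replaces the single four-branch per-element loop with aggregate tallies (total, predicted-positives, actual-positives, true-positives) over the materialized pair list, deriving fp, fn and tn by confusion-matrix identities.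
import Mathlib
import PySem

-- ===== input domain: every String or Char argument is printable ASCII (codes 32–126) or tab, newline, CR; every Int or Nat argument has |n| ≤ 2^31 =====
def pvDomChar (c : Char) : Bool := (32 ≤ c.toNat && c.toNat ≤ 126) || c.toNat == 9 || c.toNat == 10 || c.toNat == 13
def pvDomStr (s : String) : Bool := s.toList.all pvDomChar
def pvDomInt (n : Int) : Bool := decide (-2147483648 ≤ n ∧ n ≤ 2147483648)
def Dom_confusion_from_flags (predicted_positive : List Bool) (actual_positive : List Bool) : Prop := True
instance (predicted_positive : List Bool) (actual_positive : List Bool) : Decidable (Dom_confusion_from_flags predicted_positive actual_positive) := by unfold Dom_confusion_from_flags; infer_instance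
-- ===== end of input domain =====

-- B replaces A's four-branch per-element loop with aggregate tallies over the zipped pairs
-- and derives fp/fn/tn by confusion-matrix identities (alternative decomposition, same cost).


-- ===== PORT A =====
-- literal transliteration: one loop over zip, four mutually exclusive branches updating tp/fp/tn/fn
def confusion_from_flags (predicted_positive : List Bool) (actual_positive : List Bool) : List (String × Int) :=
  let s := (predicted_positive.zip actual_positive).foldl
    (fun (st : Int × Int × Int × Int) pr =>
      let (tp, fp, tn, fn) := st
      if pr.1 && pr.2 then (tp + 1, fp, tn, fn)
      else if pr.1 && !pr.2 then (tp, fp + 1, tn, fn)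
      else if !pr.1 && !pr.2 then (tp, fp, tn + 1, fn)
      else (tp, fp, tn, fn + 1))
    (0, 0, 0, 0)
  [("tp", s.1), ("fp", s.2.1), ("tn", s.2.2.1), ("fn", s.2.2.2)]

-- ===== PORT B =====
-- aggregate tallies over the materialized pair list; fp/fn/tn by identities
def confusion_from_flags_alt (predicted_positive : List Bool) (actual_positive : List Bool) : List (String × Int) :=
  let pairs := predicted_positive.zip actual_positive
  let n : Int := pairs.length
  let p : Int := pairs.countP (fun x => x.1)
  let a : Int := pairs.countP (fun x => x.2)
  let tp : Int := pairs.countP (fun x => x.1 && x.2)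
  let fp := p - tp
  let fn := a - tp
  let tn := n - tp - fp - fn
  [("tp", tp), ("fp", fp), ("tn", tn), ("fn", fn)]

-- ===== PRECONDITION & SPEC =====
def Spec_confusion_from_flags (predicted_positive : List Bool) (actual_positive : List Bool) (out : List (String × Int)) : Prop := out = confusion_from_flags_alt predicted_positive actual_positive
instance (predicted_positive : List Bool) (actual_positive : List Bool) (out : List (String × Int)) : Decidable (Spec_confusion_from_flags predicted_positive actual_positive out) := by unfold Spec_confusion_from_flags; infer_instance

-- ===== CLAIM (what is proved, stated in full; the proofs are below) =====
def Claim_equal_confusion_from_flags : Prop := ∀ (predicted_positive : List Bool) (actual_positive : List Bool), Dom_confusion_from_flags predicted_positive actual_positive → Spec_confusion_from_flags predicted_positive actual_positive (confusion_from_flags predicted_positive actual_positive)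

-- ===== LEMMAS AND PROOFS =====

-- A's loop, started at (tp,fp,tn,fn), adds the count of each of the four disjoint cells.
lemma foldA_counts (l : List (Bool × Bool)) (tp fp tn fn : Int) :
    l.foldl
      (fun (st : Int × Int × Int × Int) pr =>
        let (tp, fp, tn, fn) := st
        if pr.1 && pr.2 then (tp + 1, fp, tn, fn)
        else if pr.1 && !pr.2 then (tp, fp + 1, tn, fn)
        else if !pr.1 && !pr.2 then (tp, fp, tn + 1, fn)
        else (tp, fp, tn, fn + 1))
      (tp, fp, tn, fn)
    = (tp + (l.countP (fun x => x.1 && x.2) : Int),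
       fp + (l.countP (fun x => x.1 && !x.2) : Int),
       tn + (l.countP (fun x => !x.1 && !x.2) : Int),
       fn + (l.countP (fun x => !x.1 && x.2) : Int)) := by
  induction l generalizing tp fp tn fn with
  | nil => simp
  | cons h t ih =>
    obtain ⟨b1, b2⟩ := h
    cases b1 <;> cases b2 <;>
      simp only [List.foldl_cons, List.countP_cons, ih] <;> simp <;> ring_nf

-- each cell count splits the marginal counts
lemma countP_split (l : List (Bool × Bool)) :
    l.countP (fun x => x.1) = l.countP (fun x => x.1 && x.2) + l.countP (fun x => x.1 && !x.2)
    ∧ l.countP (fun x => x.2) = l.countP (fun x => x.1 && x.2) + l.countP (fun x => !x.1 && x.2)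
    ∧ l.length = l.countP (fun x => x.1 && x.2) + l.countP (fun x => x.1 && !x.2)
        + l.countP (fun x => !x.1 && !x.2) + l.countP (fun x => !x.1 && x.2) := by
  induction l with
  | nil => simp
  | cons h t ih =>
    obtain ⟨b1, b2⟩ := h
    cases b1 <;> cases b2 <;> simp <;> omega

-- ===== VERDICT (by name: the statement is the Claim_ definition above) =====
theorem confusion_from_flags_spec : Claim_equal_confusion_from_flags := by
  intro p a _
  unfold Spec_confusion_from_flags confusion_from_flags confusion_from_flags_alt
  obtain ⟨h1, h2, h3⟩ := countP_split (p.zip a)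
  simp only [foldA_counts]
  simp only [List.cons.injEq, Prod.mk.injEq, and_true, true_and]
  refine ⟨?_, ?_, ?_, ?_⟩ <;> push_cast <;> omega
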